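-- pv_equiv track=rewrite | github.com/rekerok/web3-utils | check_balance.py | remove_duplicates_adress
-- ===== SOURCE A (Python) =====
-- def remove_duplicates_adress(data):
--     unique_addresses = set()
--     cleaned_data = []
--     for item in data:
--         address = item[0]
--         if address not in unique_addresses:
--             unique_addresses.add(address)
--             cleaned_data.append(item)
--         else:
--             item[0] = ""  # Замена адреса на пустую строку
--             cleaned_data.append(item)
--     return cleaned_data
-- ===== SOURCE B (Python) =====
-- def remove_duplicates_adress(data):
--     # Pass 1: record the index of the first occurrence of each address.
--     first = {}
--     for i, item in enumerate(data):
--         address = item[0]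
--         if address not in first:
--             first[address] = i
--     # Pass 2: blank the address of every item that is not the first occurrence.
--     result = []
--     for i, item in enumerate(data):
--         if first.get(item[0]) != i:
--             item[0] = ""
--         result.append(item)
--     return result
-- ===== Notes on version B (the rewrite author's own statement) =====
-- stated objective: alternative
-- what changed: Replaces the fused single pass with a mutable seen-set by two separate passes: one builds a dict mapping each address to its first-occurrence index, the second blanks every item whose index is not that first index.
import Mathlib
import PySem

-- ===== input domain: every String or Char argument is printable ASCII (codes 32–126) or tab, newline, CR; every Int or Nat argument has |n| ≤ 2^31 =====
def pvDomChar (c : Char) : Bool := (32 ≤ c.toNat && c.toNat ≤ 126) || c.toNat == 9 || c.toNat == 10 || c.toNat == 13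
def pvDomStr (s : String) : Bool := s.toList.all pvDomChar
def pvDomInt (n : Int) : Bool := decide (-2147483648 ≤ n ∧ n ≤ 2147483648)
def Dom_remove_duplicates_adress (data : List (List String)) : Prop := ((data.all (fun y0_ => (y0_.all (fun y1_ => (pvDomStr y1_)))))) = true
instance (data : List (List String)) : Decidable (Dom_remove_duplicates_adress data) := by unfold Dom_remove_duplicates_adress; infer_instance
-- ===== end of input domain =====

-- B separates the work into two passes (dict of first-occurrence indices, then a blanking pass)
-- instead of A's single fused pass with a seen-set; equal cost, different decomposition.
-- Both A and B mutate the inner lists in place in Python; the theorems are about the return value.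

-- ===== PORT A =====
-- Single pass: seen-set of addresses and an output accumulator. item[0] is item.headD "",
-- exact under Pre_ (nonempty items); item[0] = "" is replacing the head.
def remove_duplicates_adress (data : List (List String)) : List (List String) :=
  (data.foldl
    (fun (st : PySem.Set String × List (List String)) item =>
      let address := item.headD ""
      if address ∉ st.1 then
        (PySem.Set.add st.1 address, st.2 ++ [item])
      else
        (st.1, st.2 ++ ["" :: item.tail]))
    ((PySem.Set.empty : PySem.Set String), ([] : List (List String)))).2

-- ===== PORT B =====
-- Pass 1 of Source B: for i, item in enumerate(data): if item[0] not in first: first[item[0]] = i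
def pvFirstPass (d : PySem.Dict String Int) (i : Int) : List (List String) → PySem.Dict String Int
  | [] => d
  | item :: rest =>
      let address := item.headD ""
      pvFirstPass (if d.contains address then d else d.insert address i) (i + 1) rest

-- Pass 2 of Source B: blank item[0] when first.get(item[0]) != i, append every item.
def pvSecondPass (first : PySem.Dict String Int) (i : Int) : List (List String) → List (List String)
  | [] => []
  | item :: rest =>
      (if first.get? (item.headD "") ≠ some i then "" :: item.tail else item)
        :: pvSecondPass first (i + 1) rest

def remove_duplicates_adress_alt (data : List (List String)) : List (List String) :=
  pvSecondPass (pvFirstPass PySem.Dict.empty 0 data) 0 data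

-- ===== PRECONDITION & SPEC =====
-- Pre_ excludes inputs containing an empty inner list: there item[0] raises IndexError in A (and in B).
def Pre_remove_duplicates_adress (data : List (List String)) : Prop :=
  ∀ item ∈ data, item ≠ []
instance (data : List (List String)) : Decidable (Pre_remove_duplicates_adress data) := by
  unfold Pre_remove_duplicates_adress; infer_instance

def pvWitness_remove_duplicates_adress : List (List String) :=
  [["a", "1"], ["b"], ["a", "2"]]

def Spec_remove_duplicates_adress (data : List (List String)) (out : List (List String)) : Prop := out = remove_duplicates_adress_alt data
instance (data : List (List String)) (out : List (List String)) : Decidable (Spec_remove_duplicates_adress data out) := by unfold Spec_remove_duplicates_adress; infer_instance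

-- ===== CLAIM (what is proved, stated in full; the proofs are below) =====
def Claim_equal_remove_duplicates_adress : Prop := ∀ (data : List (List String)), Dom_remove_duplicates_adress data → Pre_remove_duplicates_adress data → Spec_remove_duplicates_adress data (remove_duplicates_adress data)

-- ===== LEMMAS AND PROOFS =====

-- Canonical form both ports reduce to: blank the head of items whose address was seen before.
def pvBlank (s : PySem.Set String) : List (List String) → List (List String)
  | [] => []
  | item :: rest =>
      let a := item.headD ""
      if a ∈ s then ("" :: item.tail) :: pvBlank s rest
      else item :: pvBlank (PySem.Set.add s a) rest

lemma pvFoldA (l : List (List String)) :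
    ∀ (s : PySem.Set String) (acc : List (List String)),
      (l.foldl
        (fun (st : PySem.Set String × List (List String)) item =>
          let address := item.headD ""
          if address ∉ st.1 then
            (PySem.Set.add st.1 address, st.2 ++ [item])
          else
            (st.1, st.2 ++ ["" :: item.tail]))
        (s, acc)).2 = acc ++ pvBlank s l := by
  induction l with
  | nil => intro s acc; simp [pvBlank]
  | cons item rest ih =>
      intro s acc
      simp only [List.foldl_cons, pvBlank]
      by_cases h : item.headD "" ∈ s
      · rw [if_neg (not_not_intro h), if_pos h, ih]
        simp
      · rw [if_pos h, if_neg h, ih]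
        simp

lemma pvFirstPass_get?_of_isSome (l : List (List String)) :
    ∀ (d : PySem.Dict String Int) (i : Int) (a : String),
      (d.get? a).isSome → (pvFirstPass d i l).get? a = d.get? a := by
  induction l with
  | nil => intro d i a _; rfl
  | cons item rest ih =>
      intro d i a h
      simp only [pvFirstPass]
      by_cases hc : d.contains (item.headD "") = true
      · rw [if_pos hc]; exact ih d (i + 1) a h
      · rw [if_neg hc]
        by_cases hea : a = item.headD ""
        · exfalso
          rw [PySem.Dict.contains_eq_isSome_get?] at hc
          rw [← hea] at hc; exact hc h
        · rw [ih _ (i + 1) a (by rw [PySem.Dict.get?_insert_of_ne _ _ hea]; exact h),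
            PySem.Dict.get?_insert_of_ne _ _ hea]

lemma pvMain (l : List (List String)) :
    ∀ (d : PySem.Dict String Int) (i : Int) (s : PySem.Set String),
      (∀ a, (d.get? a).isSome ↔ a ∈ s) →
      (∀ a j, d.get? a = some j → j < i) →
      pvSecondPass (pvFirstPass d i l) i l = pvBlank s l := by
  induction l with
  | nil => intro d i s _ _; rfl
  | cons item rest ih =>
      intro d i s hmem hlt
      simp only [pvFirstPass, pvSecondPass, pvBlank]
      by_cases h : (item.head?.getD "") ∈ s
      · have hsome : (d.get? (item.head?.getD "")).isSome := (hmem _).2 h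
        have hc : d.contains (item.head?.getD "") = true := by
          rw [PySem.Dict.contains_eq_isSome_get?]; exact hsome
        obtain ⟨j, hj⟩ := Option.isSome_iff_exists.1 hsome
        have hne : (pvFirstPass d (i + 1) rest).get? (item.head?.getD "") ≠ some i := by
          rw [pvFirstPass_get?_of_isSome rest d (i + 1) _ hsome, hj]
          intro hcon
          have := hlt _ _ hj
          have : j = i := by injection hcon
          omega
        have hrest := ih d (i + 1) s hmem (fun a j hja => lt_trans (hlt a j hja) (by omega))
        simp [hc, hne, h, hrest]
      · have hnone : d.get? (item.head?.getD "") = none := by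
          cases hd : d.get? (item.head?.getD "") with
          | none => rfl
          | some j => exact absurd ((hmem _).1 (by rw [hd]; rfl)) h
        have hc : d.contains (item.head?.getD "") = false := by
          rw [PySem.Dict.contains_eq_isSome_get?, hnone]; rfl
        have hkeep : ¬ ((pvFirstPass (d.insert (item.head?.getD "") i) (i + 1) rest).get?
            (item.head?.getD "") ≠ some i) := by
          rw [pvFirstPass_get?_of_isSome rest _ (i + 1) _ (by simp [PySem.Dict.get?_insert_self])]
          simp [PySem.Dict.get?_insert_self]
        have hrest : pvSecondPass (pvFirstPass (d.insert (item.head?.getD "") i) (i + 1) rest) (i + 1) rest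
            = pvBlank (PySem.Set.add s (item.head?.getD "")) rest := by
          refine ih (d.insert (item.head?.getD "") i) (i + 1) (PySem.Set.add s (item.head?.getD "")) ?_ ?_
          · intro a
            by_cases hea : a = (item.head?.getD "")
            · subst hea; simp [PySem.Dict.get?_insert_self, PySem.Set.mem_add]
            · rw [PySem.Dict.get?_insert_of_ne _ _ hea, PySem.Set.mem_add]
              constructor
              · exact fun hs => Or.inl ((hmem a).1 hs)
              · rintro (hs | hs)
                · exact (hmem a).2 hs
                · exact absurd hs hea
          · intro a j hja
            by_cases hea : a = (item.head?.getD "")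
            · subst hea; rw [PySem.Dict.get?_insert_self] at hja
              have : i = j := by injection hja
              omega
            · rw [PySem.Dict.get?_insert_of_ne _ _ hea] at hja
              exact lt_trans (hlt a j hja) (by omega)
        have hkeep' : (pvFirstPass (d.insert (item.head?.getD "") i) (i + 1) rest).get?
            (item.head?.getD "") = some i := not_not.1 hkeep
        simp [hc, h, hkeep', hrest]

-- ===== VERDICT (by name: the statement is the Claim_ definition above) =====
theorem remove_duplicates_adress_spec : Claim_equal_remove_duplicates_adress := by
  intro data _ _
  unfold Spec_remove_duplicates_adress remove_duplicates_adress remove_duplicates_adress_alt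
  rw [pvFoldA data PySem.Set.empty []]
  rw [pvMain data PySem.Dict.empty 0 PySem.Set.empty
      (fun a => by simp [PySem.Dict.get?_empty, PySem.Set.empty])
      (fun a j hja => by simp [PySem.Dict.get?_empty] at hja)]
  rfl
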